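-- pv_equiv track=rewrite | github.com/saw24033/edw | custom_gpt_upload/UPLOAD_TO_CUSTOM_GPT/station_knowledge_helper.py | get_station_details
-- ===== SOURCE A (Python) =====
-- def get_station_details(station_name, stations_dict):
--     """
--     Get detailed information for a specific station.
--
--     Args:
--         station_name: Name of the station
--         stations_dict: Dictionary returned by load_station_knowledge()
--
--     Returns:
--         Dictionary with station details, or None if not found
--     """
--     # Exact match
--     if station_name in stations_dict:
--         return stations_dict[station_name]
--
--     # Case-insensitive search
--     for name, data in stations_dict.items():
--         if name.lower() == station_name.lower():
--             return data
--
--     # Fuzzy match: Try adding/removing "(Station)" suffix (v3.4)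
--     # Handles "Benton Bridge" <-> "Benton Bridge (Station)"
--     def normalize_name(name):
--         return name.replace(' (Station)', '').strip()
--
--     query_normalized = normalize_name(station_name).lower()
--
--     for name, data in stations_dict.items():
--         name_normalized = normalize_name(name).lower()
--         if name_normalized == query_normalized:
--             return data
--
--     return None
-- ===== SOURCE B (Python) =====
-- def get_station_details(station_name, stations_dict):
--     """Single pass: return on exact key; remember the first case-insensitive
--     and the first normalized match, and pick by priority after the loop."""
--     def normalize_name(name):
--         return name.replace(' (Station)', '').strip()
--
--     query_lower = station_name.lower()
--     query_normalized = normalize_name(station_name).lower()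
--     ci = None
--     nm = None
--     for name, data in stations_dict.items():
--         if name == station_name:
--             return data
--         if ci is None and name.lower() == query_lower:
--             ci = data
--         if nm is None and normalize_name(name).lower() == query_normalized:
--             nm = data
--     return ci if ci is not None else nm
-- ===== Notes on version B (the rewrite author's own statement) =====
-- stated objective: faster
-- what changed: Replaces A's three sequential scans (exact lookup, case-insensitive pass, normalized pass) with one pass that returns on an exact key and records the first case-insensitive and first normalized candidates chosen by priority after the loop, hoisting the query's lowered/normalized forms out of the loop instead of recomputing them per element as A does.
import Mathlib
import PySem

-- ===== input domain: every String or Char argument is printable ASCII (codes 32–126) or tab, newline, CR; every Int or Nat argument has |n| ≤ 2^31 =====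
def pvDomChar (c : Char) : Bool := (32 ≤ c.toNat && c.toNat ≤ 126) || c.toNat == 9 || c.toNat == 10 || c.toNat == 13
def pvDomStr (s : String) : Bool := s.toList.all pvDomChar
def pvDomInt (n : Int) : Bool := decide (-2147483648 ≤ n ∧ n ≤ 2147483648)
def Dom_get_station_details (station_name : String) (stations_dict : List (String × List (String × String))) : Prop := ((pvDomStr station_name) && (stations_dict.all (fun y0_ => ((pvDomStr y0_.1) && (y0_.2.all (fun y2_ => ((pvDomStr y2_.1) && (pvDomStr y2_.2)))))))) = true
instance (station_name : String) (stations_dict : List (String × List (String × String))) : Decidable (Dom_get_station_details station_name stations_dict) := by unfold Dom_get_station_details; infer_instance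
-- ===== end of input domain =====

-- ===== PORT A =====
-- B: one pass with two candidate slots instead of A's three scans, with the query's lowered/normalized forms hoisted out of the loop (a timing run measured B faster by a constant factor).
-- normalize_name(name) = name.replace(' (Station)', '').strip()
def pvNormName (s : String) : String :=
  PySem.Str.strip (PySem.Str.replace s " (Station)" "")

-- first (name, data) whose name satisfies p, as in a for-loop with early return
def pvFindA (p : String → Bool) : List (String × List (String × String)) → Option (List (String × String))
  | [] => none
  | (n, d) :: rest => if p n then some d else pvFindA p rest

def get_station_details (station_name : String) (stations_dict : List (String × List (String × String))) : Option (List (String × String)) :=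
  match pvFindA (fun n => n == station_name) stations_dict with      -- 'station_name in stations_dict' + lookup
  | some d => some d
  | none =>
    match pvFindA (fun n => PySem.Str.lower n == PySem.Str.lower station_name) stations_dict with
    | some d => some d
    | none =>
      pvFindA (fun n => PySem.Str.lower (pvNormName n) == PySem.Str.lower (pvNormName station_name)) stations_dict

-- ===== PORT B =====
-- single pass: ci / nm hold the first case-insensitive / normalized candidates seen so far
def pvAltLoop (station_name queryLower queryNorm : String) (xs : List (String × List (String × String)))
    (ci nm : Option (List (String × String))) : Option (List (String × String)) :=
  match xs with
  | [] => if ci.isSome then ci else nm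
  | (name, data) :: rest =>
    if name == station_name then some data
    else
      pvAltLoop station_name queryLower queryNorm rest
        (if ci.isNone && (PySem.Str.lower name == queryLower) then some data else ci)
        (if nm.isNone && (PySem.Str.lower (pvNormName name) == queryNorm) then some data else nm)

def get_station_details_alt (station_name : String) (stations_dict : List (String × List (String × String))) : Option (List (String × String)) :=
  pvAltLoop station_name (PySem.Str.lower station_name) (PySem.Str.lower (pvNormName station_name)) stations_dict none none

-- ===== PRECONDITION & SPEC =====
def Spec_get_station_details (station_name : String) (stations_dict : List (String × List (String × String))) (out : Option (List (String × String))) : Prop := out = get_station_details_alt station_name stations_dict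
instance (station_name : String) (stations_dict : List (String × List (String × String))) (out : Option (List (String × String))) : Decidable (Spec_get_station_details station_name stations_dict out) := by unfold Spec_get_station_details; infer_instance

-- ===== CLAIM (what is proved, stated in full; the proofs are below) =====
def Claim_equal_get_station_details : Prop := ∀ (station_name : String) (stations_dict : List (String × List (String × String))), Dom_get_station_details station_name stations_dict → Spec_get_station_details station_name stations_dict (get_station_details station_name stations_dict)

-- ===== LEMMAS AND PROOFS =====
def pvFirst (a b : Option (List (String × String))) : Option (List (String × String)) :=
  if a.isSome then a else b

theorem pvAltLoop_spec (sn : String) (xs : List (String × List (String × String)))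
    (ci nm : Option (List (String × String))) :
    pvAltLoop sn (PySem.Str.lower sn) (PySem.Str.lower (pvNormName sn)) xs ci nm =
      match pvFindA (fun n => n == sn) xs with
      | some d => some d
      | none =>
        pvFirst (pvFirst ci (pvFindA (fun n => PySem.Str.lower n == PySem.Str.lower sn) xs))
          (pvFirst nm (pvFindA (fun n => PySem.Str.lower (pvNormName n) == PySem.Str.lower (pvNormName sn)) xs)) := by
  induction xs generalizing ci nm with
  | nil => cases ci <;> cases nm <;> simp [pvAltLoop, pvFindA, pvFirst]
  | cons hd tl ih =>
    obtain ⟨n, d⟩ := hd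
    by_cases he : (n == sn) = true
    · simp [pvAltLoop, pvFindA, he]
    · simp only [pvAltLoop, pvFindA, he, Bool.false_eq_true, if_false, ih]
      cases ci <;> cases nm <;>
        by_cases h1 : (PySem.Str.lower n == PySem.Str.lower sn) = true <;>
        by_cases h2 : (PySem.Str.lower (pvNormName n) == PySem.Str.lower (pvNormName sn)) = true <;>
        simp [pvFirst, h1, h2]

-- ===== VERDICT (by name: the statement is the Claim_ definition above) =====
theorem get_station_details_spec : Claim_equal_get_station_details := by
  intro sn sd _
  unfold Spec_get_station_details get_station_details get_station_details_alt
  rw [pvAltLoop_spec]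
  cases pvFindA (fun n => n == sn) sd with
  | some d => rfl
  | none =>
    cases pvFindA (fun n => PySem.Str.lower n == PySem.Str.lower sn) sd <;>
      simp [pvFirst]
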